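-- pv_equiv track=rewrite | github.com/HeythemAmara/Backend_Recommandation | app/services/primini_service.py | process_fournisseur
-- ===== SOURCE A (Python) =====
-- def process_fournisseur(fournisseur_str):
--     """Process fournisseur field into shop and ad_titles lists."""
--     shop_list = []
--     ad_titles_list = []
--     count = 1  # ! TO REMOVE
--     for entry in fournisseur_str.split(','):
--         if count == 1:  # ! TO REMOVE
--             parts = entry.split(':')
--             count = 2  # ! TO REMOVE
--             if len(parts) == 2:
--                 shop_list.append(parts[0].strip().lower())
--                 ad_titles_list.append(parts[1].strip())
--         else:  # ! TO REMOVE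
--             count = 1  # ! TO REMOVE
--     return shop_list, ad_titles_list
-- ===== SOURCE B (Python) =====
-- def process_fournisseur(fournisseur_str):
--     """Process fournisseur field into shop and ad_titles lists."""
--     pairs = [e.split(':') for e in fournisseur_str.split(',')[::2]]
--     shop_list = [p[0].strip().lower() for p in pairs if len(p) == 2]
--     ad_titles_list = [p[1].strip() for p in pairs if len(p) == 2]
--     return shop_list, ad_titles_list
-- ===== Notes on version B (the rewrite author's own statement) =====
-- stated objective: simpler
-- what changed: Replaced the toggling count-state loop with a stride slice [::2] selecting the even-indexed entries, then two list comprehensions (filter len==2, map strip/lower) instead of an accumulator loop.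
import Mathlib
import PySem

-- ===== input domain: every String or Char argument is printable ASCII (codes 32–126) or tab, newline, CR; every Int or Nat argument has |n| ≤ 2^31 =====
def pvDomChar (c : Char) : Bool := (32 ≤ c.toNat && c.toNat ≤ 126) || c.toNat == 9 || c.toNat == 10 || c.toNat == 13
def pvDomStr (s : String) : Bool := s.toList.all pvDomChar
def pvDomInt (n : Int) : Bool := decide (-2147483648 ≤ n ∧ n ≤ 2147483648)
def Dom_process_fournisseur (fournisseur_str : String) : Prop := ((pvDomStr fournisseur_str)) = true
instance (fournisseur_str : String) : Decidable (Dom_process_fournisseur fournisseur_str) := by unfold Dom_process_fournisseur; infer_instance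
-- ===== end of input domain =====

-- B replaces A's toggling count-state loop by a stride slice [::2] plus two list comprehensions (simpler decomposition, same cost).

-- ===== PORT A =====
-- literal transliteration of A: fold over split(',') carrying (shop_list, ad_titles_list, count)
def process_fournisseur (fournisseur_str : String) : List String × List String :=
  let r := ((PySem.Str.split? fournisseur_str ",").getD []).foldl
    (fun (st : List String × List String × Int) entry =>
      let shop_list := st.1
      let ad_titles_list := st.2.1
      let count := st.2.2
      if count = 1 then
        let parts := (PySem.Str.split? entry ":").getD []
        if parts.length = 2 then
          (shop_list ++ [PySem.Str.lower (PySem.Str.strip ((PySem.List.pyGet? parts 0).getD ""))],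
           ad_titles_list ++ [PySem.Str.strip ((PySem.List.pyGet? parts 1).getD "")], 2)
        else (shop_list, ad_titles_list, 2)
      else (shop_list, ad_titles_list, 1))
    ([], [], 1)
  (r.1, r.2.1)

-- ===== PORT B =====
-- literal transliteration of B: pairs = [e.split(':') for e in s.split(',')[::2]]; two comprehensions
def process_fournisseur_alt (fournisseur_str : String) : List String × List String :=
  let pairs := ((PySem.List.slice? ((PySem.Str.split? fournisseur_str ",").getD []) none none 2).getD []).map
    (fun e => (PySem.Str.split? e ":").getD [])
  let shop_list := (pairs.filter (fun p => p.length == 2)).map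
    (fun p => PySem.Str.lower (PySem.Str.strip ((PySem.List.pyGet? p 0).getD "")))
  let ad_titles_list := (pairs.filter (fun p => p.length == 2)).map
    (fun p => PySem.Str.strip ((PySem.List.pyGet? p 1).getD ""))
  (shop_list, ad_titles_list)

-- ===== PRECONDITION & SPEC =====
def Spec_process_fournisseur (fournisseur_str : String) (out : List String × List String) : Prop := out = process_fournisseur_alt fournisseur_str
instance (fournisseur_str : String) (out : List String × List String) : Decidable (Spec_process_fournisseur fournisseur_str out) := by unfold Spec_process_fournisseur; infer_instance

-- ===== CLAIM (what is proved, stated in full; the proofs are below) =====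
def Claim_equal_process_fournisseur : Prop := ∀ (fournisseur_str : String), Dom_process_fournisseur fournisseur_str → Spec_process_fournisseur fournisseur_str (process_fournisseur fournisseur_str)

-- ===== LEMMAS AND PROOFS =====

-- every other element, starting with the first
def pvEvens {α : Type} : List α → List α
  | [] => []
  | [x] => [x]
  | x :: _ :: r => x :: pvEvens r

lemma pvEvens_filterMap {α : Type} (xs : List α) :
    List.filterMap (fun k => xs[2 * k]?) (List.range ((xs.length + 1) / 2)) = pvEvens xs := by
  induction xs using pvEvens.induct with
  | case1 => simp [pvEvens]
  | case2 x => simp [pvEvens]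
  | case3 x y r ih =>
    have hlen : ((x :: y :: r).length + 1) / 2 = (r.length + 1) / 2 + 1 := by
      simp; omega
    rw [hlen, List.range_succ_eq_map, List.filterMap_cons, List.filterMap_map]
    simp only [Nat.mul_zero, List.getElem?_cons_zero, Function.comp]
    have hstep : (fun k => (x :: y :: r)[2 * Nat.succ k]?) = (fun k => r[2 * k]?) := by
      funext k
      have : 2 * Nat.succ k = (2 * k) + 1 + 1 := by omega
      rw [this]
      simp
    rw [hstep]
    simp [pvEvens, ih]

lemma pvEvens_slice {α : Type} (xs : List α) :
    (PySem.List.slice? xs none none 2).getD [] = pvEvens xs := by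
  simp only [PySem.List.slice?, PySem.List.sliceIndices]
  norm_num
  have hif : (if 0 < xs.length then (((xs.length : Int) + 2 - 1) / 2).toNat else 0)
      = (xs.length + 1) / 2 := by
    split <;> omega
  have hidx : (fun k : ℕ => xs[((2 : Int) * (k : Int)).toNat]?) = (fun k : ℕ => xs[2 * k]?) := by
    funext k
    have h2k : ((2 : Int) * (k : Int)).toNat = 2 * k := by omega
    rw [h2k]
  rw [hif, hidx, pvEvens_filterMap]

lemma pv_loop (entries : List String) (shop titles : List String) :
    (entries.foldl
      (fun (st : List String × List String × Int) entry =>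
        let shop_list := st.1
        let ad_titles_list := st.2.1
        let count := st.2.2
        if count = 1 then
          let parts := (PySem.Str.split? entry ":").getD []
          if parts.length = 2 then
            (shop_list ++ [PySem.Str.lower (PySem.Str.strip ((PySem.List.pyGet? parts 0).getD ""))],
             ad_titles_list ++ [PySem.Str.strip ((PySem.List.pyGet? parts 1).getD "")], 2)
          else (shop_list, ad_titles_list, 2)
        else (shop_list, ad_titles_list, 1))
      (shop, titles, 1)) =
    (shop ++ (((pvEvens entries).map (fun e => (PySem.Str.split? e ":").getD [])).filter (fun p => p.length == 2)).map
        (fun p => PySem.Str.lower (PySem.Str.strip ((PySem.List.pyGet? p 0).getD ""))),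
     titles ++ (((pvEvens entries).map (fun e => (PySem.Str.split? e ":").getD [])).filter (fun p => p.length == 2)).map
        (fun p => PySem.Str.strip ((PySem.List.pyGet? p 1).getD "")),
     if entries.length % 2 = 0 then 1 else 2) := by
  induction entries using pvEvens.induct generalizing shop titles with
  | case1 => simp [pvEvens]
  | case2 x =>
    by_cases h : ((PySem.Str.split? x ":").getD []).length = 2 <;>
      simp [pvEvens, h, List.filter]
  | case3 x y r ih =>
    have hmod : (x :: y :: r).length % 2 = r.length % 2 := by simp; omega
    by_cases h : ((PySem.Str.split? x ":").getD []).length = 2 <;>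
      simp [pvEvens, h, List.foldl_cons, ih] <;>
        (have h2 : (r.length + 1 + 1) % 2 = r.length % 2 := by omega
         simp [h2])

-- ===== VERDICT (by name: the statement is the Claim_ definition above) =====
theorem process_fournisseur_spec : Claim_equal_process_fournisseur := by
  intro s _
  unfold Spec_process_fournisseur process_fournisseur process_fournisseur_alt
  simp [pvEvens_slice, pv_loop]
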